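-- pv_equiv track=rewrite | github.com/tsubaric/cuke-lab3 | lab/lab3_test.py | get_index_loop_level
-- ===== SOURCE A (Python) =====
-- def get_index_loop_level(loop_iterate_list, indices_index):
--     result_list = []
--     for i in range(0, len(indices_index)):
--         line_list = []
--         line = indices_index[i]
--         for j in range(0,len(line)):
--             obj_list = []
--             one_obj = line[j]
--             for k in range(0, len(one_obj)):
--                 for l in range(0,len(loop_iterate_list)):
--                     if loop_iterate_list[l] == one_obj[k]:
--                         obj_list.append(len(loop_iterate_list)-l-1)
--             line_list.append(obj_list)
--         result_list.append(line_list)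
--     return result_list
-- ===== SOURCE B (Python) =====
-- def get_index_loop_level(loop_iterate_list, indices_index):
--     n = len(loop_iterate_list)
--     idx = {}
--     for i, v in enumerate(loop_iterate_list):
--         idx.setdefault(v, []).append(n - i - 1)
--     return [[[p for x in one_obj for p in idx.get(x, [])]
--              for one_obj in line]
--             for line in indices_index]
-- ===== Notes on version B (the rewrite author's own statement) =====
-- stated objective: faster
-- what changed: B builds a dict from value to its ordered list of reversed indices in one pass over loop_iterate_list, then each nested element is a single dict lookup instead of a full scan of loop_iterate_list.
import Mathlib
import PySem

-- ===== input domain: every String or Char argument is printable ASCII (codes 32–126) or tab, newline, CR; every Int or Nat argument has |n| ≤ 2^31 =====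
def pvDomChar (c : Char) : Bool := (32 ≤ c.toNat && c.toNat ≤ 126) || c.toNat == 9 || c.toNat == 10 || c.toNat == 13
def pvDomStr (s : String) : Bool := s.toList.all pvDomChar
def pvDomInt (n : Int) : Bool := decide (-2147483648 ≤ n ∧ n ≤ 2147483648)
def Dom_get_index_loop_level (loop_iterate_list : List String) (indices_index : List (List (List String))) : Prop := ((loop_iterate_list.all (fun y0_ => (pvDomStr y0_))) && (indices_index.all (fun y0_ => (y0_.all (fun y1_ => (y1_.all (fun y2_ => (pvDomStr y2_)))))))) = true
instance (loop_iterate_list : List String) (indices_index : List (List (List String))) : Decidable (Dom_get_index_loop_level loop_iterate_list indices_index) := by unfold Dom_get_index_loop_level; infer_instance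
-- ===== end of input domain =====

-- B replaces A's per-element scan of loop_iterate_list by a precomputed dict
-- value -> ordered list of reversed indices (objective: faster; A = B proved on Dom).


-- ===== PORT A =====
-- A: four nested loops; for every nested element, scan the whole loop_iterate_list
-- (by index l, here as enumerate pairs (l, value)) and append len-l-1 on each match.
def get_index_loop_level (loop_iterate_list : List String) (indices_index : List (List (List String))) : List (List (List Int)) :=
  indices_index.foldl (fun result_list line =>
    result_list ++ [line.foldl (fun line_list one_obj =>
      line_list ++ [one_obj.foldl (fun obj_list x =>
        (PySem.List.enumerate loop_iterate_list 0).foldl (fun ol p =>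
          if p.2 == x then ol ++ [(loop_iterate_list.length : Int) - p.1 - 1] else ol)
          obj_list) []]) []]) []

-- ===== PORT B =====
-- B: one pass builds idx : value -> ordered list of reversed indices (setdefault(v, []).append = modify);
-- then every nested element is a single lookup idx.get(x, []).
def pvBuildIdx (loop_iterate_list : List String) : PySem.Dict String (List Int) :=
  (PySem.List.enumerate loop_iterate_list 0).foldl
    (fun d p => d.modify p.2 [] (· ++ [(loop_iterate_list.length : Int) - p.1 - 1]))
    PySem.Dict.empty

def get_index_loop_level_alt (loop_iterate_list : List String) (indices_index : List (List (List String))) : List (List (List Int)) :=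
  let idx := pvBuildIdx loop_iterate_list
  indices_index.map (fun line => line.map (fun one_obj =>
    one_obj.flatMap (fun x => idx.getD x [])))

-- ===== PRECONDITION & SPEC =====
def Spec_get_index_loop_level (loop_iterate_list : List String) (indices_index : List (List (List String))) (out : List (List (List Int))) : Prop := out = get_index_loop_level_alt loop_iterate_list indices_index
instance (loop_iterate_list : List String) (indices_index : List (List (List String))) (out : List (List (List Int))) : Decidable (Spec_get_index_loop_level loop_iterate_list indices_index out) := by unfold Spec_get_index_loop_level; infer_instance

-- ===== CLAIM (what is proved, stated in full; the proofs are below) =====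
def Claim_equal_get_index_loop_level : Prop := ∀ (loop_iterate_list : List String) (indices_index : List (List (List String))), Dom_get_index_loop_level loop_iterate_list indices_index → Spec_get_index_loop_level loop_iterate_list indices_index (get_index_loop_level loop_iterate_list indices_index)

-- ===== LEMMAS AND PROOFS =====

-- the dict built by B holds, for each value x, exactly the reversed indices A's scan collects
theorem getD_pvBuildIdx (lil : List String) (x : String) :
    (pvBuildIdx lil).getD x [] =
      ((PySem.List.enumerate lil 0).filter (fun p => p.2 == x)).map
        (fun p => (lil.length : Int) - p.1 - 1) := by
  unfold pvBuildIdx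
  have h : (PySem.List.enumerate lil 0).foldl
      (fun d p => d.modify p.2 [] (· ++ [(lil.length : Int) - p.1 - 1])) PySem.Dict.empty
    = ((PySem.List.enumerate lil 0).map
        (fun p : Int × String => (p.2, (lil.length : Int) - p.1 - 1))).foldl
        (fun d q => d.modify q.1 [] (· ++ [q.2])) PySem.Dict.empty := by rw [List.foldl_map]
  rw [h, PySem.Dict.getD_foldl_modify_append]
  simp [List.filter_map, Function.comp_def]

-- A's inner scan of loop_iterate_list equals appending the dict entry
theorem scan_eq_getD (lil : List String) (x : String) (acc : List Int) :
    (PySem.List.enumerate lil 0).foldl (fun ol p =>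
        if p.2 == x then ol ++ [(lil.length : Int) - p.1 - 1] else ol) acc =
      acc ++ (pvBuildIdx lil).getD x [] := by
  rw [PySem.List.foldl_append_if (fun p : Int × String => p.2 == x)
        (fun p => (lil.length : Int) - p.1 - 1), getD_pvBuildIdx]

-- ===== VERDICT (by name: the statement is the Claim_ definition above) =====

theorem get_index_loop_level_spec : Claim_equal_get_index_loop_level := by
  intro lil ii _
  unfold Spec_get_index_loop_level get_index_loop_level get_index_loop_level_alt
  have hobj : ∀ one_obj : List String,
      one_obj.foldl (fun obj_list x =>
        (PySem.List.enumerate lil 0).foldl (fun ol p =>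
          if p.2 == x then ol ++ [(lil.length : Int) - p.1 - 1] else ol) obj_list) [] =
      one_obj.flatMap (fun x => (pvBuildIdx lil).getD x []) := by
    intro o
    suffices hgen : ∀ acc : List Int,
        o.foldl (fun obj_list x =>
          (PySem.List.enumerate lil 0).foldl (fun ol p =>
            if p.2 == x then ol ++ [(lil.length : Int) - p.1 - 1] else ol) obj_list) acc =
        acc ++ o.flatMap (fun x => (pvBuildIdx lil).getD x []) by
      simpa using hgen []
    induction o with
    | nil => intro acc; simp
    | cons y ys ih =>
      intro acc
      simp only [List.foldl_cons, List.flatMap_cons, scan_eq_getD lil y acc, ih,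
        List.append_assoc]
  simp only [PySem.List.foldl_append_singleton_eq_map, List.nil_append, hobj]
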